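-- pv_equiv track=rewrite | github.com/chenqimiao03/algorithm | problemset/接头密匙.py | countConsistentKeys
-- ===== SOURCE A (Python) =====
-- from typing import List
--
-- class TrieTree:
--
--     def __init__(self) -> None:
--         self._N = 80001
--         self._tree = [[0 for i in range(12)] for j in range(self._N)]
--         self._path = [0 for i in range(self._N)]
--         self._cnt = 1
--
--     def build(self):
--         self._cnt = 1
--
--     def charAt(self, c):
--         if c == '-':
--             return 10
--         elif c == '#':
--             return 11
--         else:
--             return ord(c) - ord('0')
--
--     def clear(self):
--         for i in range(self._cnt):
--             for j in range(12):
--                 self._tree[i][j] = 0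
--             self._path[i] = 0
--         self._cnt = 1
--
--     def insert(self, word):
--         cur = 1
--         self._path[cur] += 1
--         for i in range(len(word)):
--             j = self.charAt(word[i])
--             if self._tree[cur][j] == 0:
--                 self._cnt += 1
--                 self._tree[cur][j] = self._cnt
--             cur = self._tree[cur][j]
--             self._path[cur] += 1
--
--     def count(self, word):
--         cur = 1
--         for i in range(len(word)):
--             j = self.charAt(word[i])
--             if self._tree[cur][j] == 0:
--                 return 0
--             cur = self._tree[cur][j]
--         return self._path[cur]
--
-- def countConsistentKeys(b: List[List[int]], a: List[List[int]]) -> List[int]: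
--     # write code here
--     tree = TrieTree()
--     tree.build()
--     for num in a:
--         builder = []
--         for i in range(1, len(num)):
--             builder.append(str(num[i] - num[i - 1]))
--             builder.append('#')
--         tree.insert(''.join(builder))
--     ret = []
--     for i in range(len(b)):
--         builder = []
--         for j in range(1, len(b[i])):
--             builder.append(str(b[i][j] - b[i][j - 1]))
--             builder.append('#')
--         ret.append(tree.count(''.join(builder)))
--     tree.clear()
--     return ret
-- ===== SOURCE B (Python) =====
-- def countConsistentKeys(b, a):
--     def enc(num):
--         return "".join(str(num[i] - num[i - 1]) + "#" for i in range(1, len(num)))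
--     keys = [enc(num) for num in a]
--     return [sum(1 for s in keys if s.startswith(enc(row))) for row in b]
-- ===== Notes on version B (the rewrite author's own statement) =====
-- stated objective: simpler
-- what changed: B drops A's hand-rolled fixed-capacity array trie (insert every key's '#'-delimited difference-string, then walk the trie keeping per-node path counts) and instead encodes each key once into its difference-string and answers each query by directly counting keys whose encoding starts with the query's encoding.
import Mathlib
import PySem

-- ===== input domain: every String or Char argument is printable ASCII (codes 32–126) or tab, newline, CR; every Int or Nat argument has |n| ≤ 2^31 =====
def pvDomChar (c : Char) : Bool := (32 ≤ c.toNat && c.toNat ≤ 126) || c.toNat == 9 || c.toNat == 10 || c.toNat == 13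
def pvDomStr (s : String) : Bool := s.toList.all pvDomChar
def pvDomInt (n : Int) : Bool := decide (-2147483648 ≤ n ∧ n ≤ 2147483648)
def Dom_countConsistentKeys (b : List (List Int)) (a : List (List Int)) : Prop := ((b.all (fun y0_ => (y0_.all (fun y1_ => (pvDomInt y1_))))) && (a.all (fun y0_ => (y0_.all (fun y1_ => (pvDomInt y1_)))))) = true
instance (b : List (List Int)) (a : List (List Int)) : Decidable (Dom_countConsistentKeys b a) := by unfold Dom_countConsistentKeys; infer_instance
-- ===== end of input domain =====

-- B replaces A's hand-rolled fixed-capacity trie (insert difference-strings, walk the trie to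
-- count matches) by a direct scan: encode every key once, then count keys whose encoding starts
-- with the query's encoding.  Objective: simpler.  Equality is about return values; A mutates
-- only its own local trie, so there are no observable side effects on arguments.

-- ===== PORT A =====
-- TrieTree._tree / _path are Python lists of fixed size 80001; inputs that would overflow them
-- (Python IndexError) are excluded by Pre_ below, so the rows/paths are modelled as total
-- functions Nat → … (index out of the natural range never occurs on admitted inputs).
def pvCharAt (c : Char) : Int :=
  if c = '-' then 10 else if c = '#' then 11 else (c.toNat : Int) - 48

structure PvTrie where
  tree : Nat → Int → Nat
  path : Nat → Nat
  cnt : Nat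

def pvInit : PvTrie := { tree := fun _ _ => 0, path := fun _ => 0, cnt := 1 }

-- one iteration of TrieTree.insert's loop body (state, cur) with j = charAt(word[i])
def pvStep (s : PvTrie × Nat) (j : Int) : PvTrie × Nat :=
  let st := s.1
  let cur := s.2
  if st.tree cur j = 0 then
    let m := st.cnt + 1
    ({ tree := fun x y => if x = cur ∧ y = j then m else st.tree x y,
       path := fun n => if n = m then st.path m + 1 else st.path n,
       cnt := m }, m)
  else
    let c := st.tree cur j
    ({ st with path := fun n => if n = c then st.path c + 1 else st.path n }, c)

def pvBump (t : PvTrie) : PvTrie :=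
  { t with path := fun n => if n = 1 then t.path 1 + 1 else t.path n }

def pvInsert (t : PvTrie) (word : List Char) : PvTrie :=
  (word.foldl (fun s c => pvStep s (pvCharAt c)) (pvBump t, 1)).1

def pvCountGo (t : PvTrie) (cur : Nat) : List Char → Nat
  | [] => t.path cur
  | c :: r => if t.tree cur (pvCharAt c) = 0 then 0 else pvCountGo t (t.tree cur (pvCharAt c)) r

def pvCount (t : PvTrie) (word : List Char) : Nat := pvCountGo t 1 word

-- builder loop + ''.join (A repeats this code verbatim for a-rows and b-rows)
def pvEncA (num : List Int) : List Char :=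
  PySem.Chars.join []
    ((PySem.List.pyRange 1 (PySem.List.len num)).foldl
      (fun builder i =>
        builder ++ [PySem.Int.toChars (PySem.List.pyGetD num i 0 - PySem.List.pyGetD num (i - 1) 0), ['#']])
      [])

def countConsistentKeys (b : List (List Int)) (a : List (List Int)) : List Int :=
  let t := a.foldl (fun tr num => pvInsert tr (pvEncA num)) pvInit
  -- tree.clear() only resets the (local) trie and does not touch ret; no-op for the return value
  (PySem.List.pyRange 0 (PySem.List.len b)).foldl
    (fun ret i => ret ++ [(pvCount t (pvEncA (PySem.List.pyGetD b i ([] : List Int))) : Int)]) []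

-- ===== PORT B =====
def pvEncB (num : List Int) : List Char :=
  ((PySem.List.pyRange 1 (PySem.List.len num)).map
    (fun i => PySem.Int.toChars (PySem.List.pyGetD num i 0 - PySem.List.pyGetD num (i - 1) 0) ++ ['#'])).flatten

def countConsistentKeys_alt (b : List (List Int)) (a : List (List Int)) : List Int :=
  let keys := a.map pvEncB
  b.map (fun row => ((keys.countP (fun s => PySem.Chars.startswith s (pvEncB row))) : Int))

-- ===== PRECONDITION & SPEC =====
-- Pre_-private copy of the difference-string encoder (Pre_ may not reach the ports).
def pvEncP (num : List Int) : List Char :=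
  ((PySem.List.pyRange 1 (PySem.List.len num)).map
    (fun i => PySem.Int.toChars (PySem.List.pyGetD num i 0 - PySem.List.pyGetD num (i - 1) 0) ++ ['#'])).flatten

-- A's trie has fixed capacity 80001 nodes (node 1 = root); inserting the keys allocates one node
-- per distinct nonempty prefix of their difference-strings and raises IndexError as soon as node
-- id 80001 is touched, i.e. exactly when the keys of `a` have ≥ 80000 distinct nonempty prefixes.
def Pre_countConsistentKeys (b : List (List Int)) (a : List (List Int)) : Prop :=
  ((a.map pvEncP).flatMap (fun w => (List.range w.length).map (fun k => w.take (k + 1)))).dedup.length ≤ 79999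

instance (b : List (List Int)) (a : List (List Int)) : Decidable (Pre_countConsistentKeys b a) := by
  unfold Pre_countConsistentKeys; infer_instance

def pvWitness_countConsistentKeys : List (List Int) × List (List Int) := ([[1, 2]], [[0, 1]])

def Spec_countConsistentKeys (b : List (List Int)) (a : List (List Int)) (out : List Int) : Prop := out = countConsistentKeys_alt b a
instance (b : List (List Int)) (a : List (List Int)) (out : List Int) : Decidable (Spec_countConsistentKeys b a out) := by unfold Spec_countConsistentKeys; infer_instance

-- ===== CLAIM (what is proved, stated in full; the proofs are below) =====
def Claim_equal_countConsistentKeys : Prop := ∀ (b : List (List Int)) (a : List (List Int)), Dom_countConsistentKeys b a → Pre_countConsistentKeys b a → Spec_countConsistentKeys b a (countConsistentKeys b a)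

-- ===== LEMMAS AND PROOFS =====

-- code-level view of the trie operations (insert/count after mapping charAt over the word)
def pvInsC (t : PvTrie) (w : List Int) : PvTrie × Nat := w.foldl pvStep (pvBump t, 1)

def pvCntC (t : PvTrie) (cur : Nat) : List Int → Nat
  | [] => t.path cur
  | j :: r => if t.tree cur j = 0 then 0 else pvCntC t (t.tree cur j) r

theorem pvInsert_eq (t : PvTrie) (w : List Char) :
    pvInsert t w = (pvInsC t (w.map pvCharAt)).1 := by
  simp [pvInsert, pvInsC, List.foldl_map]

theorem pvCountGo_eq (t : PvTrie) (w : List Char) : ∀ cur,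
    pvCountGo t cur w = pvCntC t cur (w.map pvCharAt) := by
  induction w with
  | nil => intro cur; rfl
  | cons c r ih => intro cur; simp [pvCountGo, pvCntC, ih]

def pvNodeFrom (t : PvTrie) (cur : Nat) (w : List Int) : Nat :=
  w.foldl (fun c j => t.tree c j) cur

def pvNodeF (t : PvTrie) (w : List Int) : Nat := pvNodeFrom t 1 w

theorem pvNodeF_snoc (t : PvTrie) (w : List Int) (j : Int) :
    pvNodeF t (w ++ [j]) = t.tree (pvNodeF t w) j := by
  simp [pvNodeF, pvNodeFrom, List.foldl_append]

theorem pvNodeFrom_zero (t : PvTrie) (hz : ∀ j, t.tree 0 j = 0) : ∀ (w : List Int),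
    pvNodeFrom t 0 w = 0 := by
  intro w
  induction w with
  | nil => rfl
  | cons j r ih =>
    show pvNodeFrom t (t.tree 0 j) r = 0
    rw [hz j]; exact ih

theorem pvNodeF_ext (t : PvTrie) (w : List Int) (r : List Int)
    (hz : ∀ j, t.tree 0 j = 0) (h0 : pvNodeF t w = 0) : pvNodeF t (w ++ r) = 0 := by
  have : pvNodeF t (w ++ r) = pvNodeFrom t (pvNodeF t w) r := by
    simp [pvNodeF, pvNodeFrom, List.foldl_append]
  rw [this, h0, pvNodeFrom_zero t hz]

structure PvInv (t : PvTrie) (ws : List (List Int)) : Prop where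
  zrow : ∀ j, t.tree 0 j = 0
  pzero : t.path 0 = 0
  lecnt : ∀ w, pvNodeF t w ≤ t.cnt
  ftree : ∀ n j, t.cnt < n → t.tree n j = 0
  fpath : ∀ n, t.cnt < n → t.path n = 0
  live : ∀ w, pvNodeF t w ≠ 0 ↔ (w = [] ∨ ∃ u ∈ ws, w <+: u)
  inj : ∀ w w', pvNodeF t w ≠ 0 → pvNodeF t w' ≠ 0 → pvNodeF t w = pvNodeF t w' → w = w'
  pathc : ∀ w, t.path (pvNodeF t w) = ws.countP (fun u => decide (w <+: u))

theorem pv_countP_snoc (ws : List (List Int)) (x w : List Int) :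
    (ws ++ [x]).countP (fun u => decide (w <+: u))
      = ws.countP (fun u => decide (w <+: u)) + (if w <+: x then 1 else 0) := by
  by_cases h : w <+: x <;> simp [List.countP_append, h]

theorem pv_not_snoc_prefix (p : List Int) (j : Int) : ¬ (p ++ [j] <+: p) := by
  intro h
  have := h.length_le
  simp at this

theorem pv_nodeF_init (w : List Int) : pvNodeF pvInit w = if w = [] then 1 else 0 := by
  cases w with
  | nil => rfl
  | cons j r =>
    rw [if_neg (List.cons_ne_nil j r)]
    show pvNodeFrom pvInit (pvInit.tree 1 j) r = 0
    exact pvNodeFrom_zero pvInit (fun _ => rfl) r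

theorem pv_init_inv : PvInv pvInit [] := by
  refine ⟨fun _ => rfl, rfl, ?_, fun _ _ _ => rfl, fun _ _ => rfl, ?_, ?_, ?_⟩
  · intro w; rw [pv_nodeF_init]; split <;> simp [pvInit]
  · intro w; rw [pv_nodeF_init]; split <;> simp_all
  · intro w w' h1 h2 _
    rw [pv_nodeF_init] at h1; rw [pv_nodeF_init] at h2
    split at h1 <;> split at h2 <;> simp_all
  · intro w; rw [pv_nodeF_init]; split <;> simp [pvInit]

-- the two shapes of pvStep
def pvBumpAt (st : PvTrie) (c : Nat) : PvTrie :=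
  { st with path := fun n => if n = c then st.path c + 1 else st.path n }

def pvCreated (st : PvTrie) (cur : Nat) (j : Int) : PvTrie :=
  { tree := fun x y => if x = cur ∧ y = j then st.cnt + 1 else st.tree x y,
    path := fun n => if n = st.cnt + 1 then st.path (st.cnt + 1) + 1 else st.path n,
    cnt := st.cnt + 1 }

theorem pvStep_follow_eq (st : PvTrie) (cur : Nat) (j : Int) (hz : st.tree cur j ≠ 0) :
    pvStep (st, cur) j = (pvBumpAt st (st.tree cur j), st.tree cur j) := by
  simp [pvStep, pvBumpAt, hz]

theorem pvStep_create_eq (st : PvTrie) (cur : Nat) (j : Int) (hz : st.tree cur j = 0) :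
    pvStep (st, cur) j = (pvCreated st cur j, st.cnt + 1) := by
  simp [pvStep, pvCreated, hz]

theorem pvNodeF_bumpAt (st : PvTrie) (c : Nat) (w : List Int) :
    pvNodeF (pvBumpAt st c) w = pvNodeF st w := rfl

theorem pvNodeF_bump (st : PvTrie) (w : List Int) :
    pvNodeF (pvBump st) w = pvNodeF st w := rfl

-- how creating one node changes the walk function
theorem pvNodeF_created (st : PvTrie) (p : List Int) (j : Int)
    (hp0 : pvNodeF st p ≠ 0)
    (hzrow : ∀ y, st.tree 0 y = 0)
    (hle : ∀ w, pvNodeF st w ≤ st.cnt)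
    (hfr : ∀ n y, st.cnt < n → st.tree n y = 0)
    (hinj : ∀ w w', pvNodeF st w ≠ 0 → pvNodeF st w' ≠ 0 → pvNodeF st w = pvNodeF st w' → w = w') :
    ∀ w, pvNodeF (pvCreated st (pvNodeF st p) j) w
      = if p ++ [j] <+: w then (if w = p ++ [j] then st.cnt + 1 else 0) else pvNodeF st w := by
  have hcur_le : pvNodeF st p ≤ st.cnt := hle p
  intro w
  induction w using List.reverseRecOn with
  | nil => rw [if_neg (by simp)]; rfl
  | append_singleton w k ih =>
    rw [pvNodeF_snoc, ih]
    by_cases hw : p ++ [j] <+: w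
    · have hwk : p ++ [j] <+: w ++ [k] := hw.trans (List.prefix_append w [k])
      have hne : w ++ [k] ≠ p ++ [j] := by
        intro hEq
        have h1 := hw.length_le
        have h2 : w.length + 1 = p.length + 1 := by
          have := congrArg List.length hEq; simpa using this
        simp at h1; omega
      rw [if_pos hw, if_pos hwk, if_neg hne]
      by_cases hwp : w = p ++ [j]
      · rw [if_pos hwp]
        show (if st.cnt + 1 = pvNodeF st p ∧ k = j then st.cnt + 1 else st.tree (st.cnt + 1) k) = 0
        rw [if_neg (by intro hx; have := hx.1; omega), hfr _ _ (by omega)]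
      · rw [if_neg hwp]
        show (if (0 : Nat) = pvNodeF st p ∧ k = j then st.cnt + 1 else st.tree 0 k) = 0
        rw [if_neg (by intro hx; exact hp0 hx.1.symm), hzrow]
    · rw [if_neg hw]
      by_cases hhit : pvNodeF st w = pvNodeF st p ∧ k = j
      · obtain ⟨hh1, hh2⟩ := hhit
        have hw0 : pvNodeF st w ≠ 0 := by rw [hh1]; exact hp0
        have hwp : w = p := hinj w p hw0 hp0 hh1
        have h4 : p ++ [j] <+: w ++ [k] := by rw [hwp, hh2]
        have h5 : w ++ [k] = p ++ [j] := by rw [hwp, hh2]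
        have hkey : (pvCreated st (pvNodeF st p) j).tree (pvNodeF st w) k = st.cnt + 1 := by
          show (if pvNodeF st w = pvNodeF st p ∧ k = j then st.cnt + 1 else st.tree (pvNodeF st w) k)
              = st.cnt + 1
          rw [if_pos ⟨hh1, hh2⟩]
        rw [hkey, if_pos h4, if_pos h5]
      · have hcond : ¬ (p ++ [j] <+: w ++ [k]) := by
          intro hx
          rcases List.prefix_concat_iff.1 hx with h3 | h3
          · obtain ⟨hpw, hjk⟩ := List.append_inj h3.symm (by
              have := congrArg List.length h3
              simp at this; omega)
            have hk : k = j := by simpa using hjk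
            exact hhit ⟨by rw [hpw], hk⟩
          · exact hw h3
        rw [if_neg hcond]
        show (if pvNodeF st w = pvNodeF st p ∧ k = j then st.cnt + 1 else st.tree (pvNodeF st w) k)
            = pvNodeF st (w ++ [k])
        rw [if_neg hhit, pvNodeF_snoc]

theorem pv_bump_inv (t : PvTrie) (ws : List (List Int)) (h : PvInv t ws) :
    PvInv (pvBump t) (ws ++ [[]]) := by
  have hcnt1 : 1 ≤ t.cnt := h.lecnt []
  refine ⟨h.zrow, ?_, h.lecnt, h.ftree, ?_, ?_, h.inj, ?_⟩
  · show (if (0 : Nat) = 1 then t.path 1 + 1 else t.path 0) = 0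
    rw [if_neg (by omega), h.pzero]
  · intro n hn
    have hn' : t.cnt < n := hn
    show (if n = 1 then t.path 1 + 1 else t.path n) = 0
    rw [if_neg (by omega), h.fpath n hn']
  · intro w
    rw [pvNodeF_bump, h.live w]
    constructor
    · rintro (rfl | ⟨u, hu, hwu⟩)
      · exact Or.inl rfl
      · exact Or.inr ⟨u, by simp [hu], hwu⟩
    · rintro (rfl | ⟨u, hu, hwu⟩)
      · exact Or.inl rfl
      · rcases List.mem_append.1 hu with h1 | h1
        · exact Or.inr ⟨u, h1, hwu⟩
        · have hu0 : u = [] := by simpa using h1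
          rw [hu0] at hwu
          exact Or.inl (List.prefix_nil.1 hwu)
  · intro w
    rw [pvNodeF_bump, pv_countP_snoc]
    by_cases h1 : pvNodeF t w = 1
    · have hw : w = [] := h.inj w [] (by omega) (by show (1 : Nat) ≠ 0; omega) (by rw [h1]; rfl)
      rw [hw]
      show (if pvNodeF t [] = 1 then t.path 1 + 1 else t.path (pvNodeF t [])) = _
      have e1 : pvNodeF t [] = 1 := rfl
      rw [e1, if_pos (rfl : (1 : Nat) = 1), if_pos (List.prefix_refl ([] : List Int))]
      have hp := h.pathc []
      rw [e1] at hp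
      omega
    · show (if pvNodeF t w = 1 then t.path 1 + 1 else t.path (pvNodeF t w)) = _
      rw [if_neg h1, h.pathc w, if_neg (by
        intro hx
        exact h1 (by rw [List.prefix_nil.1 hx]; rfl))]
      omega

theorem pv_step_follow (st : PvTrie) (ws0 : List (List Int)) (p : List Int) (j : Int)
    (h : PvInv st (ws0 ++ [p])) (hz : st.tree (pvNodeF st p) j ≠ 0) :
    PvInv (pvStep (st, pvNodeF st p) j).1 (ws0 ++ [p ++ [j]]) ∧
      (pvStep (st, pvNodeF st p) j).2 = pvNodeF (pvStep (st, pvNodeF st p) j).1 (p ++ [j]) := by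
  rw [pvStep_follow_eq st (pvNodeF st p) j hz]
  have hc : st.tree (pvNodeF st p) j = pvNodeF st (p ++ [j]) := (pvNodeF_snoc st p j).symm
  have hc0 : pvNodeF st (p ++ [j]) ≠ 0 := by rw [← hc]; exact hz
  have hcle : pvNodeF st (p ++ [j]) ≤ st.cnt := h.lecnt _
  constructor
  · refine ⟨h.zrow, ?_, h.lecnt, h.ftree, ?_, ?_, h.inj, ?_⟩
    · show (if (0 : Nat) = st.tree (pvNodeF st p) j then _ + 1 else st.path 0) = 0
      rw [if_neg (by rw [hc]; omega), h.pzero]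
    · intro n hn
      have hn' : st.cnt < n := hn
      show (if n = st.tree (pvNodeF st p) j then _ + 1 else st.path n) = 0
      rw [if_neg (by rw [hc]; omega), h.fpath n hn']
    · intro w
      rw [pvNodeF_bumpAt, h.live w]
      constructor
      · rintro (rfl | ⟨u, hu, hwu⟩)
        · exact Or.inl rfl
        · rcases List.mem_append.1 hu with h1 | h1
          · exact Or.inr ⟨u, by simp [h1], hwu⟩
          · have hup : u = p := by simpa using h1
            rw [hup] at hwu
            exact Or.inr ⟨p ++ [j], by simp, hwu.trans (List.prefix_append p [j])⟩
      · rintro (rfl | ⟨u, hu, hwu⟩)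
        · exact Or.inl rfl
        · rcases List.mem_append.1 hu with h1 | h1
          · exact Or.inr ⟨u, by simp [h1], hwu⟩
          · have hup : u = p ++ [j] := by simpa using h1
            rw [hup] at hwu
            rcases List.prefix_concat_iff.1 hwu with h2 | h2
            · rw [h2]
              exact ((h.live (p ++ [j])).1 hc0)
            · exact Or.inr ⟨p, by simp, h2⟩
    · intro w
      rw [pvNodeF_bumpAt, pv_countP_snoc]
      by_cases hwc : pvNodeF st w = st.tree (pvNodeF st p) j
      · have hw0 : pvNodeF st w ≠ 0 := by rw [hwc]; exact hz
        have hw : w = p ++ [j] := h.inj w (p ++ [j]) hw0 hc0 (by rw [hwc, hc])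
        rw [hw]
        show (if pvNodeF st (p ++ [j]) = st.tree (pvNodeF st p) j
            then st.path (st.tree (pvNodeF st p) j) + 1
            else st.path (pvNodeF st (p ++ [j]))) = _
        rw [if_pos hc.symm, if_pos (List.prefix_refl _), hc]
        have hp' := h.pathc (p ++ [j])
        rw [pv_countP_snoc, if_neg (pv_not_snoc_prefix p j)] at hp'
        omega
      · show (if pvNodeF st w = st.tree (pvNodeF st p) j then _ + 1 else st.path (pvNodeF st w)) = _
        rw [if_neg hwc, h.pathc w, pv_countP_snoc]
        have hiff : (w <+: p ++ [j]) ↔ (w <+: p) := by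
          constructor
          · intro hx
            rcases List.prefix_concat_iff.1 hx with h3 | h3
            · exact absurd (by rw [h3, hc] : pvNodeF st w = st.tree (pvNodeF st p) j) hwc
            · exact h3
          · intro hx; exact hx.trans (List.prefix_append p [j])
        by_cases hx : w <+: p
        · rw [if_pos hx, if_pos (hiff.2 hx)]
        · rw [if_neg hx, if_neg (fun hy => hx (hiff.1 hy))]
  · show st.tree (pvNodeF st p) j = pvNodeF (pvBumpAt st (st.tree (pvNodeF st p) j)) (p ++ [j])
    rw [pvNodeF_bumpAt, hc]

theorem pv_step_create (st : PvTrie) (ws0 : List (List Int)) (p : List Int) (j : Int)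
    (h : PvInv st (ws0 ++ [p])) (hz : st.tree (pvNodeF st p) j = 0) :
    PvInv (pvStep (st, pvNodeF st p) j).1 (ws0 ++ [p ++ [j]]) ∧
      (pvStep (st, pvNodeF st p) j).2 = pvNodeF (pvStep (st, pvNodeF st p) j).1 (p ++ [j]) := by
  have hp0 : pvNodeF st p ≠ 0 := (h.live p).2 (Or.inr ⟨p, by simp, List.prefix_refl p⟩)
  rw [pvStep_create_eq st (pvNodeF st p) j hz]
  have N := pvNodeF_created st p j hp0 h.zrow h.lecnt h.ftree h.inj
  have himg : ∀ w, pvNodeF st w ≠ st.cnt + 1 := by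
    intro w hx; have := h.lecnt w; omega
  have hple : pvNodeF st p ≤ st.cnt := h.lecnt p
  have hpm : st.path (st.cnt + 1) = 0 := h.fpath _ (by omega)
  have hdead : ∀ w, p ++ [j] <+: w → w ≠ p ++ [j] → pvNodeF st w = 0 := by
    intro w hpre hne
    obtain ⟨r, rfl⟩ := hpre
    refine pvNodeF_ext st (p ++ [j]) r h.zrow ?_
    rw [pvNodeF_snoc]; exact hz
  have hstrict : ∀ w, p ++ [j] <+: w → w ≠ p ++ [j] → ¬ (w <+: p ++ [j]) := by
    intro w h1 h2 h3
    exact h2 (h3.eq_of_length (by have := h1.length_le; have := h3.length_le; omega))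
  have hcntP0 : (ws0 ++ [p]).countP (fun u => decide ((p ++ [j]) <+: u)) = 0 := by
    have := h.pathc (p ++ [j])
    rw [pvNodeF_snoc, hz, h.pzero] at this
    omega
  have hdead_cnt : ∀ w, pvNodeF st w = 0 → (ws0 ++ [p]).countP (fun u => decide (w <+: u)) = 0 := by
    intro w hw
    have := h.pathc w
    rw [hw, h.pzero] at this
    omega
  constructor
  · refine ⟨?_, ?_, ?_, ?_, ?_, ?_, ?_, ?_⟩
    · intro y
      show (if (0 : Nat) = pvNodeF st p ∧ y = j then st.cnt + 1 else st.tree 0 y) = 0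
      rw [if_neg (fun hx => hp0 hx.1.symm), h.zrow]
    · show (if (0 : Nat) = st.cnt + 1 then st.path (st.cnt + 1) + 1 else st.path 0) = 0
      rw [if_neg (by omega), h.pzero]
    · intro w
      rw [N w]
      show _ ≤ st.cnt + 1
      split_ifs with h1 h2
      · omega
      · omega
      · have := h.lecnt w; omega
    · intro n y hn
      have hn' : st.cnt + 1 < n := hn
      show (if n = pvNodeF st p ∧ y = j then st.cnt + 1 else st.tree n y) = 0
      rw [if_neg (by intro hx; have := hx.1; omega), h.ftree n y (by omega)]
    · intro n hn
      have hn' : st.cnt + 1 < n := hn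
      show (if n = st.cnt + 1 then st.path (st.cnt + 1) + 1 else st.path n) = 0
      rw [if_neg (by omega), h.fpath n (by omega)]
    · intro w
      rw [N w]
      by_cases h1 : p ++ [j] <+: w
      · rw [if_pos h1]
        by_cases h2 : w = p ++ [j]
        · rw [if_pos h2]
          constructor
          · intro _; exact Or.inr ⟨p ++ [j], by simp, by rw [h2]⟩
          · intro _; omega
        · rw [if_neg h2]
          constructor
          · intro hx; omega
          · rintro (rfl | ⟨u, hu, hwu⟩)
            · exact absurd (List.prefix_nil.1 h1) (by simp)
            · rcases List.mem_append.1 hu with h3 | h3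
              · have : pvNodeF st w ≠ 0 := (h.live w).2 (Or.inr ⟨u, by simp [h3], hwu⟩)
                exact absurd (hdead w h1 h2) this
              · have hup : u = p ++ [j] := by simpa using h3
                rw [hup] at hwu
                exact absurd hwu (hstrict w h1 h2)
      · rw [if_neg h1, h.live w]
        have hiff : (w <+: p ++ [j]) ↔ (w <+: p) := by
          constructor
          · intro hx
            rcases List.prefix_concat_iff.1 hx with h3 | h3
            · exact absurd (by rw [h3] : p ++ [j] <+: w) h1
            · exact h3
          · intro hx; exact hx.trans (List.prefix_append p [j])
        constructor
        · rintro (rfl | ⟨u, hu, hwu⟩)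
          · exact Or.inl rfl
          · rcases List.mem_append.1 hu with h3 | h3
            · exact Or.inr ⟨u, by simp [h3], hwu⟩
            · have hup : u = p := by simpa using h3
              rw [hup] at hwu
              exact Or.inr ⟨p ++ [j], by simp, hiff.2 hwu⟩
        · rintro (rfl | ⟨u, hu, hwu⟩)
          · exact Or.inl rfl
          · rcases List.mem_append.1 hu with h3 | h3
            · exact Or.inr ⟨u, by simp [h3], hwu⟩
            · have hup : u = p ++ [j] := by simpa using h3
              rw [hup] at hwu
              exact Or.inr ⟨p, by simp, hiff.1 hwu⟩
    · intro w w' hw0 hw0' heq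
      rw [N w] at hw0 heq
      rw [N w'] at hw0' heq
      split_ifs at hw0 hw0' heq with a1 a2 a3 a4 a5 a6 a7 a8 a9
      all_goals first
        | (exact absurd rfl hw0)
        | (exact absurd rfl hw0')
        | omega
        | (exact absurd heq (himg w'))
        | (exact absurd heq.symm (himg w'))
        | (exact absurd heq (himg w))
        | (exact absurd heq.symm (himg w))
        | (exact h.inj w w' hw0 hw0' heq)
        | simp_all
    · intro w
      rw [N w, pv_countP_snoc]
      by_cases h1 : p ++ [j] <+: w
      · rw [if_pos h1]
        by_cases h2 : w = p ++ [j]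
        · rw [if_pos h2]
          show (if st.cnt + 1 = st.cnt + 1 then st.path (st.cnt + 1) + 1 else st.path (st.cnt + 1)) = _
          rw [if_pos rfl, hpm, if_pos (by rw [h2])]
          have h5 := hcntP0
          rw [pv_countP_snoc, if_neg (pv_not_snoc_prefix p j)] at h5
          rw [h2]
          omega
        · rw [if_neg h2]
          show (if (0 : Nat) = st.cnt + 1 then st.path (st.cnt + 1) + 1 else st.path 0) = _
          rw [if_neg (by omega), h.pzero, if_neg (hstrict w h1 h2)]
          have h3 := hdead_cnt w (hdead w h1 h2)
          rw [pv_countP_snoc] at h3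
          omega
      · rw [if_neg h1]
        show (if pvNodeF st w = st.cnt + 1 then st.path (st.cnt + 1) + 1 else st.path (pvNodeF st w)) = _
        rw [if_neg (himg w), h.pathc w, pv_countP_snoc]
        have hiff : (w <+: p ++ [j]) ↔ (w <+: p) := by
          constructor
          · intro hx
            rcases List.prefix_concat_iff.1 hx with h3 | h3
            · exact absurd (by rw [h3] : p ++ [j] <+: w) h1
            · exact h3
          · intro hx; exact hx.trans (List.prefix_append p [j])
        by_cases hx : w <+: p
        · rw [if_pos hx, if_pos (hiff.2 hx)]
        · rw [if_neg hx, if_neg (fun hy => hx (hiff.1 hy))]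
  · show st.cnt + 1 = pvNodeF (pvCreated st (pvNodeF st p) j) (p ++ [j])
    rw [N (p ++ [j]), if_pos (List.prefix_refl _), if_pos rfl]

theorem pvInsC_inv (t : PvTrie) (ws : List (List Int)) (h : PvInv t ws) (p : List Int) :
    PvInv (pvInsC t p).1 (ws ++ [p]) ∧ (pvInsC t p).2 = pvNodeF (pvInsC t p).1 p := by
  induction p using List.reverseRecOn with
  | nil => exact ⟨pv_bump_inv t ws h, rfl⟩
  | append_singleton p j ih =>
    obtain ⟨h1, h2⟩ := ih
    have hfold : pvInsC t (p ++ [j]) = pvStep (pvInsC t p) j := by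
      simp [pvInsC, List.foldl_append]
    have hpair : pvInsC t p = ((pvInsC t p).1, pvNodeF (pvInsC t p).1 p) := by
      rw [← h2]
    rw [hfold, hpair]
    by_cases hz : (pvInsC t p).1.tree (pvNodeF (pvInsC t p).1 p) j = 0
    · exact pv_step_create (pvInsC t p).1 ws p j h1 hz
    · exact pv_step_follow (pvInsC t p).1 ws p j h1 hz

theorem pv_fold_inv (l : List (List Int)) : ∀ (t : PvTrie) (ws : List (List Int)), PvInv t ws →
    PvInv (l.foldl (fun tr num => pvInsert tr (pvEncA num)) t)
      (ws ++ l.map (fun num => (pvEncA num).map pvCharAt)) := by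
  induction l with
  | nil => intro t ws h; simpa using h
  | cons x r ih =>
    intro t ws h
    have h1 := (pvInsC_inv t ws h ((pvEncA x).map pvCharAt)).1
    have := ih ((pvInsC t ((pvEncA x).map pvCharAt)).1) (ws ++ [(pvEncA x).map pvCharAt]) h1
    simpa [pvInsert_eq, List.append_assoc] using this

theorem pvCntC_eq_path (t : PvTrie) (hz : ∀ j, t.tree 0 j = 0) (hp : t.path 0 = 0)
    (w : List Int) : ∀ cur, pvCntC t cur w = t.path (pvNodeFrom t cur w) := by
  induction w with
  | nil => intro cur; rfl
  | cons j r ih =>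
    intro cur
    show (if t.tree cur j = 0 then 0 else pvCntC t (t.tree cur j) r)
        = t.path (pvNodeFrom t cur (j :: r))
    by_cases hj : t.tree cur j = 0
    · rw [if_pos hj]
      have h0 : pvNodeFrom t cur (j :: r) = 0 := by
        show pvNodeFrom t (t.tree cur j) r = 0
        rw [hj]; exact pvNodeFrom_zero t hz r
      rw [h0, hp]
    · rw [if_neg hj]
      exact ih (t.tree cur j)

-- characters of the encodings
def pvGood (c : Char) : Prop :=
  c ∈ (['0', '1', '2', '3', '4', '5', '6', '7', '8', '9', '-', '#'] : List Char)

theorem pv_digitChar_good (m : Nat) (h : m < 10) : pvGood (Nat.digitChar m) := by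
  unfold pvGood
  interval_cases m <;> decide

theorem pv_toDigitsCore_good (f : Nat) : ∀ (n : Nat) (l : List Char), (∀ c ∈ l, pvGood c) →
    ∀ c ∈ Nat.toDigitsCore 10 f n l, pvGood c := by
  induction f with
  | zero => intro n l hl c hc; exact hl c hc
  | succ f ih =>
    intro n l hl c hc
    simp only [Nat.toDigitsCore] at hc
    split at hc
    · rcases List.mem_cons.1 hc with h1 | h1
      · subst h1; exact pv_digitChar_good _ (Nat.mod_lt _ (by omega))
      · exact hl c h1
    · refine ih (n / 10) _ ?_ c hc
      intro d hd
      rcases List.mem_cons.1 hd with h1 | h1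
      · subst h1; exact pv_digitChar_good _ (Nat.mod_lt _ (by omega))
      · exact hl d h1

theorem pv_toChars_good (n : Int) : ∀ c ∈ PySem.Int.toChars n, pvGood c := by
  intro c hc
  simp only [PySem.Int.toChars] at hc
  split at hc
  · rcases List.mem_cons.1 hc with h1 | h1
    · subst h1; unfold pvGood; decide
    · exact pv_toDigitsCore_good _ _ _ (by intro d hd; cases hd) c h1
  · exact pv_toDigitsCore_good _ _ _ (by intro d hd; cases hd) c hc

theorem pvEncB_good (num : List Int) : ∀ c ∈ pvEncB num, pvGood c := by
  intro c hc
  simp only [pvEncB, List.mem_flatten, List.mem_map] at hc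
  obtain ⟨piece, ⟨i, _, rfl⟩, hcp⟩ := hc
  rcases List.mem_append.1 hcp with h1 | h1
  · exact pv_toChars_good _ c h1
  · rcases List.mem_cons.1 h1 with h2 | h2
    · subst h2; unfold pvGood; decide
    · cases h2

theorem pvCharAt_inj (c d : Char) (hc : pvGood c) (hd : pvGood d)
    (h : pvCharAt c = pvCharAt d) : c = d := by
  unfold pvGood at hc hd
  fin_cases hc <;> fin_cases hd <;> revert h <;> decide

theorem pv_prefix_map_iff (s1 : List Char) : ∀ (s2 : List Char), (∀ c ∈ s1, pvGood c) → (∀ c ∈ s2, pvGood c) →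
    (s1.map pvCharAt <+: s2.map pvCharAt ↔ s1 <+: s2) := by
  induction s1 with
  | nil => intro s2 _ _; simp
  | cons c r ih =>
    intro s2 h1 h2
    cases s2 with
    | nil => simp
    | cons d r2 =>
      simp only [List.map_cons, List.cons_prefix_cons]
      constructor
      · rintro ⟨hh, ht⟩
        have hcd : c = d := pvCharAt_inj c d (h1 c (by simp)) (h2 d (by simp)) hh
        exact ⟨hcd, (ih r2 (fun x hx => h1 x (by simp [hx])) (fun x hx => h2 x (by simp [hx]))).1 ht⟩
      · rintro ⟨hh, ht⟩
        exact ⟨by rw [hh], List.IsPrefix.map _ ht⟩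

theorem pv_join_nil_flatten (l : List (List Char)) : PySem.Chars.join [] l = l.flatten := by
  induction l with
  | nil => rfl
  | cons x xs ih =>
    cases xs with
    | nil => simp [PySem.Chars.join, List.intercalate]
    | cons y ys =>
      simp only [PySem.Chars.join, List.intercalate] at *
      simp [List.intersperse] at *
      simpa using ih

theorem pv_foldl_two_append (L : List Int) (f g : Int → List Char) : ∀ acc,
    L.foldl (fun acc i => acc ++ [f i, g i]) acc = acc ++ L.flatMap (fun i => [f i, g i]) := by
  induction L with
  | nil => intro acc; simp
  | cons x r ih => intro acc; simp [ih, List.flatMap_cons]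

theorem pvEncA_eq_encB (num : List Int) : pvEncA num = pvEncB num := by
  rw [pvEncA, pvEncB, pv_foldl_two_append, List.nil_append, pv_join_nil_flatten]
  induction PySem.List.pyRange 1 (PySem.List.len num) with
  | nil => rfl
  | cons x r ih => simp [List.flatMap_cons, ih]

-- count over the final trie = prefix count over the encoded keys
theorem pv_count_eq (a : List (List Int)) (q : List Int)
    (t : PvTrie) (ht : t = a.foldl (fun tr num => pvInsert tr (pvEncA num)) pvInit) :
    pvCntC t 1 q = a.countP (fun num => decide (q <+: (pvEncA num).map pvCharAt)) := by
  have hinv : PvInv t (a.map (fun num => (pvEncA num).map pvCharAt)) := by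
    rw [ht]; simpa using pv_fold_inv a pvInit [] pv_init_inv
  rw [pvCntC_eq_path t hinv.zrow hinv.pzero q 1]
  have := hinv.pathc q
  rw [pvNodeF] at this
  rw [this, List.countP_map]
  rfl

theorem pv_map_getD_eq (G : List Int → Int) (b : List (List Int)) :
    (PySem.List.pyRange 0 (PySem.List.len b)).map (fun i => G (PySem.List.pyGetD b i [])) = b.map G := by
  have h1 : (fun i => G (PySem.List.pyGetD b i ([] : List Int)))
      = G ∘ (fun i => PySem.List.pyGetD b i ([] : List Int)) := rfl
  rw [h1, ← List.map_map, PySem.List.map_pyGetD_pyRange_zero]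

-- ===== VERDICT (by name: the statement is the Claim_ definition above) =====
theorem countConsistentKeys_spec : Claim_equal_countConsistentKeys := by
  intro b a _ _
  show countConsistentKeys b a = countConsistentKeys_alt b a
  have hkey : ∀ row : List Int,
      pvCount (a.foldl (fun tr num => pvInsert tr (pvEncA num)) pvInit) (pvEncA row)
        = (a.map pvEncB).countP (fun s => PySem.Chars.startswith s (pvEncB row)) := by
    intro row
    rw [pvCount, pvCountGo_eq, pv_count_eq a ((pvEncA row).map pvCharAt) _ rfl, List.countP_map]
    apply List.countP_congr
    intro num _
    simp only [Function.comp]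
    by_cases hpre : pvEncB row <+: pvEncB num
    · have h1 : (pvEncA row).map pvCharAt <+: (pvEncA num).map pvCharAt := by
        rw [pvEncA_eq_encB, pvEncA_eq_encB]
        exact List.IsPrefix.map _ hpre
      simp [h1, (PySem.Chars.startswith_iff _ _).2 hpre]
    · have h1 : ¬ ((pvEncA row).map pvCharAt <+: (pvEncA num).map pvCharAt) := by
        rw [pvEncA_eq_encB, pvEncA_eq_encB]
        intro hcon
        exact hpre ((pv_prefix_map_iff _ _ (pvEncB_good row) (pvEncB_good num)).1 hcon)
      have h2 : PySem.Chars.startswith (pvEncB num) (pvEncB row) = false := by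
        rw [← Bool.not_eq_true, PySem.Chars.startswith_iff]
        exact hpre
      simp [h1, h2]
  show (PySem.List.pyRange 0 (PySem.List.len b)).foldl
      (fun ret i => ret ++ [((pvCount (a.foldl (fun tr num => pvInsert tr (pvEncA num)) pvInit)
        (pvEncA (PySem.List.pyGetD b i ([] : List Int)))) : Int)]) []
    = b.map (fun row => (((a.map pvEncB).countP
        (fun s => PySem.Chars.startswith s (pvEncB row))) : Int))
  rw [PySem.List.foldl_append_singleton_eq_map, List.nil_append]
  have hmap := pv_map_getD_eq (fun row =>
    ((pvCount (a.foldl (fun tr num => pvInsert tr (pvEncA num)) pvInit) (pvEncA row)) : Int)) b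
  simp only [] at hmap
  rw [hmap]
  apply List.map_congr_left
  intro row _
  exact congrArg Nat.cast (hkey row)
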